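-- pv_equiv track=rewrite | github.com/vtaboga/PEPS | state_space_models/abstract_model.py | get_action_indexes
-- ===== SOURCE A (Python) =====
-- def get_action_indexes(state_indexes, include_setpoint_change_difference: bool = False):
--
--     if include_setpoint_change_difference:
--         action = ['outdoor_temperature', 'humidity', 'beam_solar_rad', 'day_of_week_sin', 'day_of_week_cos',
--             'hour_of_day_cos', 'hour_of_day_sin', 'setpoint_change', 'delta_setpoint_change']
--     else:
--         action = ['outdoor_temperature', 'humidity', 'beam_solar_rad', 'day_of_week_sin', 'day_of_week_cos',
--             'hour_of_day_cos', 'hour_of_day_sin', 'setpoint_change']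
--
--     indexes = [value for key, value in state_indexes.items() if key in action]
--
--     return sorted(indexes)
-- ===== SOURCE B (Python) =====
-- def get_action_indexes(state_indexes, include_setpoint_change_difference: bool = False):
--     action = ['outdoor_temperature', 'humidity', 'beam_solar_rad', 'day_of_week_sin', 'day_of_week_cos',
--               'hour_of_day_cos', 'hour_of_day_sin', 'setpoint_change']
--     if include_setpoint_change_difference:
--         action.append('delta_setpoint_change')
--     return sorted(state_indexes[name] for name in action if name in state_indexes)
-- ===== Notes on version B (the rewrite author's own statement) =====
-- stated objective: alternative
-- what changed: B iterates over the fixed 8/9-name action list probing the dict by key lookup and collecting the present values, instead of scanning every dict item and testing each key for membership in the list; Pre_ excludes association lists with duplicate keys, which do not represent a Python dict (every actual dict input is admitted).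
import Mathlib
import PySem

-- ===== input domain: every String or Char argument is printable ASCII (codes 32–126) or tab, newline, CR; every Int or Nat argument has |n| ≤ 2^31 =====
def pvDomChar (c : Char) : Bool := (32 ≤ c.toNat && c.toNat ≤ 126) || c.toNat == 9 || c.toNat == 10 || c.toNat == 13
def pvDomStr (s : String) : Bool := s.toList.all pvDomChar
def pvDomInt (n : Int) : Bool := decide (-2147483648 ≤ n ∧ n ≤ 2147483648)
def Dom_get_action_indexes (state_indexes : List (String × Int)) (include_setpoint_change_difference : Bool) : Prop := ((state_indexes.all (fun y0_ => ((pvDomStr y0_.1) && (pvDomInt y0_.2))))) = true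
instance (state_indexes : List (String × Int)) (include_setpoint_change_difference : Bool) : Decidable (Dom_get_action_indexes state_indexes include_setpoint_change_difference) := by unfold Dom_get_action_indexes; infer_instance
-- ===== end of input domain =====

-- B iterates the fixed action-name list and probes the dict by key lookup, collecting the
-- present values, instead of scanning every dict item and testing each key against the list.


-- ===== PORT A =====
def get_action_indexes (state_indexes : List (String × Int)) (include_setpoint_change_difference : Bool) : List Int :=
  let action : List String :=
    if include_setpoint_change_difference then
      ["outdoor_temperature", "humidity", "beam_solar_rad", "day_of_week_sin", "day_of_week_cos",
       "hour_of_day_cos", "hour_of_day_sin", "setpoint_change", "delta_setpoint_change"]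
    else
      ["outdoor_temperature", "humidity", "beam_solar_rad", "day_of_week_sin", "day_of_week_cos",
       "hour_of_day_cos", "hour_of_day_sin", "setpoint_change"]
  -- [value for key, value in state_indexes.items() if key in action]
  let indexes : List Int := (state_indexes.filter (fun kv => action.contains kv.1)).map Prod.snd
  PySem.List.sorted indexes (fun x => x) false

-- ===== PORT B =====
def get_action_indexes_alt (state_indexes : List (String × Int)) (include_setpoint_change_difference : Bool) : List Int :=
  let action : List String :=
    ["outdoor_temperature", "humidity", "beam_solar_rad", "day_of_week_sin", "day_of_week_cos",
     "hour_of_day_cos", "hour_of_day_sin", "setpoint_change"]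
    ++ (if include_setpoint_change_difference then ["delta_setpoint_change"] else [])
  let d := PySem.Dict.mk state_indexes
  -- sorted(state_indexes[name] for name in action if name in state_indexes)
  PySem.List.sorted (action.filterMap (fun name => d.get? name)) (fun x => x) false

-- ===== PRECONDITION & SPEC =====
-- Pre_ excludes association lists with duplicate keys: they do not represent a Python dict
-- (A's state_indexes argument is a dict, whose keys are always unique).
def Pre_get_action_indexes (state_indexes : List (String × Int)) (include_setpoint_change_difference : Bool) : Prop :=
  (state_indexes.map Prod.fst).Nodup
instance (state_indexes : List (String × Int)) (include_setpoint_change_difference : Bool) : Decidable (Pre_get_action_indexes state_indexes include_setpoint_change_difference) := by unfold Pre_get_action_indexes; infer_instance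

def pvWitness_get_action_indexes : (List (String × Int)) × Bool :=
  ([("humidity", 3), ("indoor_temperature", 0), ("setpoint_change", 1)], false)

def Spec_get_action_indexes (state_indexes : List (String × Int)) (include_setpoint_change_difference : Bool) (out : List Int) : Prop := out = get_action_indexes_alt state_indexes include_setpoint_change_difference
instance (state_indexes : List (String × Int)) (include_setpoint_change_difference : Bool) (out : List Int) : Decidable (Spec_get_action_indexes state_indexes include_setpoint_change_difference out) := by unfold Spec_get_action_indexes; infer_instance

-- ===== CLAIM (what is proved, stated in full; the proofs are below) =====
def Claim_equal_get_action_indexes : Prop := ∀ (state_indexes : List (String × Int)) (include_setpoint_change_difference : Bool), Dom_get_action_indexes state_indexes include_setpoint_change_difference → Pre_get_action_indexes state_indexes include_setpoint_change_difference → Spec_get_action_indexes state_indexes include_setpoint_change_difference (get_action_indexes state_indexes include_setpoint_change_difference)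

-- ===== LEMMAS AND PROOFS =====

-- A's pass (values of items whose key is in `names`) is a permutation of B's pass
-- (first-match lookup of each name), provided both key lists have no duplicates.
lemma filter_perm_lookup (si : List (String × Int)) :
    ∀ names : List String, names.Nodup → (si.map Prod.fst).Nodup →
      ((si.filter (fun kv => names.contains kv.1)).map Prod.snd).Perm
        (names.filterMap (fun n => (PySem.Dict.mk si).get? n)) := by
  induction si with
  | nil =>
      intro names _ _
      have h : (names.filterMap (fun n => (PySem.Dict.mk ([] : List (String × Int))).get? n)) = [] := by
        simp [PySem.Dict.get?]
      simp [h]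
  | cons kv rest ih =>
      intro names hn hk
      obtain ⟨k, v⟩ := kv
      have hk' : (k :: rest.map Prod.fst).Nodup := by simpa using hk
      have hkrest : k ∉ rest.map Prod.fst := (List.nodup_cons.mp hk').1
      have hkn : (rest.map Prod.fst).Nodup := (List.nodup_cons.mp hk').2
      by_cases hmem : k ∈ names
      · -- names = l1 ++ k :: l2 with k occurring nowhere else
        obtain ⟨l1, l2, rfl⟩ := List.append_of_mem hmem
        rw [List.nodup_append] at hn
        have hkl1 : k ∉ l1 := fun hx => hn.2.2 k hx k (by simp) rfl
        have hkl2 : k ∉ l2 := (List.nodup_cons.mp hn.2.1).1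
        have hl12 : (l1 ++ l2).Nodup := by
          rw [List.nodup_append]
          exact ⟨hn.1, (List.nodup_cons.mp hn.2.1).2,
            fun a ha b hb => hn.2.2 a ha b (List.mem_cons_of_mem _ hb)⟩
        have hf : ∀ n, n ≠ k → (PySem.Dict.mk ((k, v) :: rest)).get? n = (PySem.Dict.mk rest).get? n := by
          intro n hne
          rw [PySem.Dict.get?_mk_cons]
          simp [Ne.symm hne]
        have hfk : (PySem.Dict.mk ((k, v) :: rest)).get? k = some v := by
          rw [PySem.Dict.get?_mk_cons]; simp
        have hR1 : (l1.filterMap (fun n => (PySem.Dict.mk ((k, v) :: rest)).get? n))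
            = l1.filterMap (fun n => (PySem.Dict.mk rest).get? n) :=
          List.filterMap_congr (fun a ha => hf a (fun h => hkl1 (h ▸ ha)))
        have hR2 : (l2.filterMap (fun n => (PySem.Dict.mk ((k, v) :: rest)).get? n))
            = l2.filterMap (fun n => (PySem.Dict.mk rest).get? n) :=
          List.filterMap_congr (fun a ha => hf a (fun h => hkl2 (h ▸ ha)))
        have hL : (rest.filter (fun kv => ((l1 ++ k :: l2).contains kv.1)))
            = rest.filter (fun kv => ((l1 ++ l2).contains kv.1)) := by
          apply List.filter_congr
          intro p hp
          have hpk : p.1 ≠ k := fun h => hkrest (h ▸ (List.mem_map_of_mem hp))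
          simp [hpk]
        have hcondk : (((l1 ++ k :: l2)).contains k) = true := by simp
        have h1 : ((((k, v) :: rest).filter (fun kv => ((l1 ++ k :: l2).contains kv.1))).map Prod.snd)
            = v :: ((rest.filter (fun kv => ((l1 ++ l2).contains kv.1))).map Prod.snd) := by
          simp only [List.filter_cons, hcondk, if_true, List.map_cons, hL]
        have e3 : ((l1 ++ k :: l2).filterMap (fun n => (PySem.Dict.mk ((k, v) :: rest)).get? n))
            = (l1.filterMap (fun n => (PySem.Dict.mk rest).get? n))
              ++ v :: (l2.filterMap (fun n => (PySem.Dict.mk rest).get? n)) := by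
          rw [List.filterMap_append, hR1, List.filterMap_cons, hfk, hR2]
        rw [h1, e3]
        have p1 := (ih (l1 ++ l2) hl12 hkn).cons v
        rw [List.filterMap_append] at p1
        exact p1.trans List.perm_middle.symm
      · -- k never probed: the head pair is filtered out and every lookup falls through to rest
        have hcond : (names.contains k) = false := by simpa using hmem
        have hL : ((((k, v) :: rest)).filter (fun kv => (names.contains kv.1)))
            = rest.filter (fun kv => (names.contains kv.1)) :=
          List.filter_cons_of_neg (by simpa using hcond)
        have hR : (names.filterMap (fun n => (PySem.Dict.mk ((k, v) :: rest)).get? n))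
            = names.filterMap (fun n => (PySem.Dict.mk rest).get? n) := by
          apply List.filterMap_congr
          intro a ha
          have hne : k ≠ a := fun h => hmem (h ▸ ha)
          rw [PySem.Dict.get?_mk_cons]
          simp [hne]
        rw [hL, hR]
        exact ih names hn hkn

-- ===== VERDICT (by name: the statement is the Claim_ definition above) =====
theorem get_action_indexes_spec : Claim_equal_get_action_indexes := by
  intro si b _ hpre
  have h9 : (["outdoor_temperature", "humidity", "beam_solar_rad", "day_of_week_sin", "day_of_week_cos",
       "hour_of_day_cos", "hour_of_day_sin", "setpoint_change", "delta_setpoint_change"] : List String).Nodup := by decide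
  have h8 : (["outdoor_temperature", "humidity", "beam_solar_rad", "day_of_week_sin", "day_of_week_cos",
       "hour_of_day_cos", "hour_of_day_sin", "setpoint_change"] : List String).Nodup := by decide
  unfold Spec_get_action_indexes
  cases b <;>
    simp only [get_action_indexes, get_action_indexes_alt, Bool.false_eq_true, if_false, if_true,
      List.append_nil, List.cons_append, List.nil_append]
  · exact PySem.List.sorted_eq_sorted_of_perm _ _ _ (fun _ _ h => h)
      (filter_perm_lookup si _ h8 hpre)
  · exact PySem.List.sorted_eq_sorted_of_perm _ _ _ (fun _ _ h => h)
      (filter_perm_lookup si _ h9 hpre)
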